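-- pv_equiv track=rewrite | github.com/Promisewjx/ragbot | app/core.py | trim_context
-- ===== SOURCE A (Python) =====
-- from typing import Optional, List, Dict, Tuple
--
-- def trim_context(contexts: List[Dict], max_chars: int) -> List[Dict]:
--     out, total = [], 0
--     for c in contexts:
--         t = c["text"]
--         if total + len(t) > max_chars:
--             break
--         out.append(c)
--         total += len(t)
--     return out
-- ===== SOURCE B (Python) =====
-- from itertools import accumulate
-- from bisect import bisect_right
--
-- def trim_context(contexts, max_chars):
--     prefix = list(accumulate(len(c["text"]) for c in contexts))
--     idx = bisect_right(prefix, max_chars)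
--     return contexts[:idx]
-- ===== Notes on version B (the rewrite author's own statement) =====
-- stated objective: alternative
-- what changed: Replaces the scan-with-early-break accumulator loop by a prefix-sum table (itertools.accumulate) plus a binary search (bisect_right) for the cutoff, returning contexts[:idx].
-- outside the precondition, e.g. on trim_context([{'text': 'ab'}, {'no': 'x'}], 1): A returns [], B raises KeyError
import Mathlib
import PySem

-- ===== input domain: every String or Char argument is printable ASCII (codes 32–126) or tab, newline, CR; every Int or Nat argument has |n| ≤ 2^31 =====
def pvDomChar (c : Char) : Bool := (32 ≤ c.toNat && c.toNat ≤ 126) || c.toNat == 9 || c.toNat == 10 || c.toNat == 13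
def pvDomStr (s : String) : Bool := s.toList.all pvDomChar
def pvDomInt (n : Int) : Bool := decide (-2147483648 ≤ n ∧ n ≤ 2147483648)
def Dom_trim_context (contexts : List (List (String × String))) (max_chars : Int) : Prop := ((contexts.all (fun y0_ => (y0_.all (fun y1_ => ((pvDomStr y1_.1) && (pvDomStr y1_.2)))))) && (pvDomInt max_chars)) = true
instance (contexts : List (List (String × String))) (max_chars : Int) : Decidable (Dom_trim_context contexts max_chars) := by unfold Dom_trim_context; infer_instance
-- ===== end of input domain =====

-- B replaces A's scan-with-early-break loop by a prefix-sum table plus a binary search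
-- (bisect_right) for the cutoff index; equal return values proved on Pre_ (every dict has a "text" key).

-- dict lookup c["text"]: first matching key in the association list (none = KeyError)
def pyLookup (d : List (String × String)) (k : String) : Option String :=
  (d.find? (fun p => p.1 == k)).map (·.2)

-- ===== PORT A =====
-- the for-loop of A: state (total); `out.append` becomes consing the kept element,
-- `break` / KeyError return the empty remainder
def trimGoA : List (List (String × String)) → Int → Int → List (List (String × String))
  | [], _, _ => []
  | c :: rest, mc, total =>
    match pyLookup c "text" with
    | none => []   -- KeyError in Python; excluded by Pre_
    | some t =>
      if total + PySem.Str.len t > mc then []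
      else c :: trimGoA rest mc (total + PySem.Str.len t)

def trim_context (contexts : List (List (String × String))) (max_chars : Int) : List (List (String × String)) :=
  trimGoA contexts max_chars 0

-- ===== PORT B =====
-- len(c["text"]) for each context ("" only on the KeyError inputs excluded by Pre_)
def lensB (cs : List (List (String × String))) : List Int :=
  cs.map (fun c => PySem.Str.len ((pyLookup c "text").getD ""))

-- itertools.accumulate, materialised as a list
def accB : Int → List Int → List Int
  | _, [] => []
  | t, l :: ls => (t + l) :: accB (t + l) ls

-- bisect.bisect_right: binary search with lo/hi bounds (fuel = hi - lo suffices)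
def brGo : Nat → Nat → Nat → List Int → Int → Nat
  | 0, lo, _, _, _ => lo
  | fuel + 1, lo, hi, a, x =>
    if lo < hi then
      let mid := (lo + hi) / 2
      if x < a.getD mid 0 then brGo fuel lo mid a x
      else brGo fuel (mid + 1) hi a x
    else lo

def trim_context_alt (contexts : List (List (String × String))) (max_chars : Int) : List (List (String × String)) :=
  let pfx := accB 0 (lensB contexts)
  let idx := brGo pfx.length 0 pfx.length pfx max_chars
  contexts.take idx

-- ===== PRECONDITION & SPEC =====
-- Pre_ excludes exactly the inputs where some context lacks the "text" key: there Python A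
-- either raises KeyError or (if the miss is past the break point) returns while B raises.
def Pre_trim_context (contexts : List (List (String × String))) (max_chars : Int) : Prop :=
  (contexts.all (fun c => c.any (fun p => p.1 == "text"))) = true
instance (contexts : List (List (String × String))) (max_chars : Int) : Decidable (Pre_trim_context contexts max_chars) := by unfold Pre_trim_context; infer_instance

def pvWitness_trim_context : (List (List (String × String))) × Int := ([[("text", "ab")], [("text", "xyz")]], 5)

def Spec_trim_context (contexts : List (List (String × String))) (max_chars : Int) (out : List (List (String × String))) : Prop := out = trim_context_alt contexts max_chars
instance (contexts : List (List (String × String))) (max_chars : Int) (out : List (List (String × String))) : Decidable (Spec_trim_context contexts max_chars out) := by unfold Spec_trim_context; infer_instance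

-- ===== CLAIM (what is proved, stated in full; the proofs are below) =====
def Claim_equal_trim_context : Prop := ∀ (contexts : List (List (String × String))) (max_chars : Int), Dom_trim_context contexts max_chars → Pre_trim_context contexts max_chars → Spec_trim_context contexts max_chars (trim_context contexts max_chars)

-- ===== LEMMAS AND PROOFS =====

-- characterisation predicate: r is the cutoff index for prefix table a and budget x
def CutP (a : List Int) (x : Int) (r : Nat) : Prop :=
  r ≤ a.length ∧ (∀ i, i < r → a.getD i 0 ≤ x) ∧ (r < a.length → x < a.getD r 0)

theorem cutP_unique {a : List Int} {x : Int} {r s : Nat}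
    (hr : CutP a x r) (hs : CutP a x s) : r = s := by
  obtain ⟨hr1, hr2, hr3⟩ := hr
  obtain ⟨hs1, hs2, hs3⟩ := hs
  by_contra hne
  rcases Nat.lt_or_ge r s with h | h
  · have h1 := hs2 r h
    have h2 := hr3 (lt_of_lt_of_le h hs1)
    omega
  · have h' : s < r := by omega
    have h1 := hr2 s h'
    have h2 := hs3 (lt_of_lt_of_le h' hr1)
    omega

theorem accB_lb {ls : List Int} (hnn : ∀ l ∈ ls, 0 ≤ l) (t : Int) :
    ∀ j, j < (accB t ls).length → t ≤ (accB t ls).getD j 0 := by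
  induction ls generalizing t with
  | nil => intro j hj; simp [accB] at hj
  | cons l ls ih =>
    intro j hj
    have hl : 0 ≤ l := hnn l (by simp)
    cases j with
    | zero => simp [accB]; omega
    | succ j =>
      simp only [accB, List.getD_cons_succ]
      have := ih (fun x hx => hnn x (by simp [hx])) (t + l) j (by
        simp [accB] at hj ⊢; omega)
      omega

theorem accB_mono {ls : List Int} (hnn : ∀ l ∈ ls, 0 ≤ l) (t : Int) :
    ∀ i j, i ≤ j → j < (accB t ls).length →
      (accB t ls).getD i 0 ≤ (accB t ls).getD j 0 := by
  induction ls generalizing t with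
  | nil => intro i j _ hj; simp [accB] at hj
  | cons l ls ih =>
    intro i j hij hj
    have hnn' : ∀ x ∈ ls, 0 ≤ x := fun x hx => hnn x (by simp [hx])
    cases i with
    | zero =>
      cases j with
      | zero => exact le_refl _
      | succ j =>
        simp only [accB, List.getD_cons_zero, List.getD_cons_succ]
        exact accB_lb hnn' (t + l) j (by simp [accB] at hj ⊢; omega)
    | succ i =>
      cases j with
      | zero => omega
      | succ j =>
        simp only [accB, List.getD_cons_succ]
        exact ih hnn' (t + l) i j (by omega) (by simp [accB] at hj ⊢; omega)

theorem brGo_cutP {a : List Int} {x : Int}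
    (hmono : ∀ i j, i ≤ j → j < a.length → a.getD i 0 ≤ a.getD j 0) :
    ∀ fuel lo hi, lo ≤ hi → hi ≤ a.length → hi - lo ≤ fuel →
      (∀ i, i < lo → a.getD i 0 ≤ x) →
      (∀ i, hi ≤ i → i < a.length → x < a.getD i 0) →
      CutP a x (brGo fuel lo hi a x) := by
  intro fuel
  induction fuel with
  | zero =>
    intro lo hi h1 h2 hf hlo hhi
    have : lo = hi := by omega
    subst this
    exact ⟨h2, hlo, fun h => hhi lo (le_refl _) h⟩
  | succ fuel ih =>
    intro lo hi h1 h2 hf hlo hhi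
    simp only [brGo]
    split
    · next hlt =>
      by_cases hc : x < a.getD ((lo + hi) / 2) 0
      · simp only [if_pos hc]
        apply ih lo ((lo + hi) / 2) (by omega) (by omega) (by omega) hlo
        intro i hi1 hi2
        exact lt_of_lt_of_le hc (hmono _ i hi1 hi2)
      · simp only [if_neg hc]
        apply ih ((lo + hi) / 2 + 1) hi (by omega) h2 (by omega) _ hhi
        intro i hi1
        have : a.getD i 0 ≤ a.getD ((lo + hi) / 2) 0 :=
          hmono i _ (by omega) (by omega)
        omega
    · next hge =>
      have : lo = hi := by omega
      subst this
      exact ⟨h2, hlo, fun h => hhi lo (le_refl _) h⟩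

-- the cutoff index computed by A's loop, as a function of the lengths
def kf : List Int → Int → Int → Nat
  | [], _, _ => 0
  | l :: ls, mc, total => if total + l > mc then 0 else kf ls mc (total + l) + 1

theorem kf_cutP (ls : List Int) (mc total : Int) :
    CutP (accB total ls) mc (kf ls mc total) := by
  induction ls generalizing total with
  | nil => exact ⟨by simp [kf, accB], by intro i hi; simp [kf] at hi, by simp [kf, accB]⟩
  | cons l ls ih =>
    by_cases h : total + l > mc
    · have hk : kf (l :: ls) mc total = 0 := by simp [kf, h]
      refine ⟨by simp [hk], by simp [hk], ?_⟩
      intro _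
      simp only [hk, accB, List.getD_cons_zero]
      omega
    · have hk : kf (l :: ls) mc total = kf ls mc (total + l) + 1 := by simp [kf, h]
      obtain ⟨ih1, ih2, ih3⟩ := ih (total + l)
      refine ⟨?_, ?_, ?_⟩
      · simp only [hk, accB, List.length_cons]
        omega
      · intro i hi
        rw [hk] at hi
        cases i with
        | zero => simp only [accB, List.getD_cons_zero]; omega
        | succ i =>
          simp only [accB, List.getD_cons_succ]
          have := ih2 i (by omega)
          omega
      · intro hlt
        simp only [hk, accB, List.length_cons] at hlt ⊢
        simp only [List.getD_cons_succ]
        have := ih3 (by omega)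
        omega

theorem goA_eq_take (cs : List (List (String × String))) (mc total : Int)
    (hpre : (cs.all (fun c => c.any (fun p => p.1 == "text"))) = true) :
    trimGoA cs mc total = cs.take (kf (lensB cs) mc total) := by
  induction cs generalizing total with
  | nil => rfl
  | cons c cs ih =>
    simp only [List.all_cons, Bool.and_eq_true] at hpre
    obtain ⟨hc, hcs⟩ := hpre
    have hfind : ∃ p ∈ c, (p.1 == "text") = true := by
      simpa [List.any_eq_true] using hc
    have hsome : (c.find? (fun p => p.1 == "text")).isSome := by
      rw [List.find?_isSome]
      exact hfind
    obtain ⟨p, hp⟩ := Option.isSome_iff_exists.mp hsome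
    have hlook : pyLookup c "text" = some p.2 := by
      simp [pyLookup, hp]
    simp only [trimGoA, hlook, lensB, List.map_cons, kf]
    have hlen : PySem.Str.len p.2 = (p.2.length : Int) := PySem.Str.len_eq p.2
    by_cases h : mc < total + (p.2.length : Int)
    · rw [if_pos (by rw [hlen]; omega), if_pos (by simp; omega)]
      simp
    · rw [if_neg (by rw [hlen]; omega), if_neg (by simp; omega),
          List.take_succ_cons]
      rw [ih (total + PySem.Str.len p.2) hcs]
      simp [lensB]

theorem lensB_nonneg (cs : List (List (String × String))) :
    ∀ l ∈ lensB cs, 0 ≤ l := by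
  intro l hl
  simp only [lensB, List.mem_map] at hl
  obtain ⟨c, _, rfl⟩ := hl
  simp [PySem.Str.len_eq]

-- ===== VERDICT (by name: the statement is the Claim_ definition above) =====
theorem trim_context_spec : Claim_equal_trim_context := by
  intro contexts max_chars _ hpre
  unfold Spec_trim_context trim_context trim_context_alt
  rw [goA_eq_take contexts max_chars 0 hpre]
  have hmono := accB_mono (lensB_nonneg contexts) 0
  have hbr := brGo_cutP (a := accB 0 (lensB contexts)) (x := max_chars) hmono
    (accB 0 (lensB contexts)).length 0 (accB 0 (lensB contexts)).length
    (Nat.zero_le _) (le_refl _) (by omega)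
    (by intro i hi; omega)
    (by intro i h1 h2; omega)
  have hkf := kf_cutP (lensB contexts) max_chars 0
  exact congrArg (fun n => List.take n contexts) (cutP_unique hkf hbr)
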